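-- pv_equiv track=rewrite | github.com/MatisBruneau/ENSAE-Projet-de-programmation | delivery_network/graph.py | saumon
-- ===== SOURCE A (Python) =====
-- def saumon(parents, src, dest): #on va remonter le dictionnaire parent pour trouver le chemin entre src et dest
--     if (src not in parents.keys()) or (dest not in parents.keys()): #on renvoie None si un des deux noeuds n'est pas dans le graphe
--         return None, None
--
--     profondeur_src = parents[src][2] #on récupère les profondeurs des trajets pour les égaliser
--     profondeur_dest = parents[dest][2]
--     node_src = src
--     node_dest = dest
--     puissance_min = 0
--     chemin_src = [src]
--     chemin_dest = [dest]
--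
--     while profondeur_src > profondeur_dest: #on égalise les profondeurs(1)
--         puissance_min = max(puissance_min, parents[node_src][1])
--         node_src = parents[node_src][0]
--         chemin_src.append(node_src)
--         profondeur_src -= 1
--
--     while profondeur_dest > profondeur_src: #on égalise les profondeurs(2)
--         puissance_min = max(puissance_min, parents[node_dest][1])
--         node_dest = parents[node_dest][0]
--         chemin_dest.append(node_dest)
--         profondeur_dest -= 1
--
--     while node_dest != node_src: #une fois que les profondeurs sont égalisées, on remonte jusqu'à tomber sur un noeud commun
--         puissance_min = max(puissance_min, parents[node_src][1])
--         node_src = parents[node_src][0]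
--         chemin_src.append(node_src)
--         puissance_min = max(puissance_min, parents[node_dest][1])
--         node_dest = parents[node_dest][0]
--         chemin_dest.append(node_dest)
--
--     del chemin_dest[-1] #on supprime le dernier élément de chemin_dest, pour ne pas le répéter
--     return chemin_src + chemin_dest[::-1], puissance_min   #on concatène les deux chemins afin de créer le trajet de src à dest
-- ===== SOURCE B (Python) =====
-- def saumon(parents, src, dest):
--     # Build the full ancestor chain of each node (node, power-to-parent) up to the
--     # depth-0 root, find the LCA as the first src-ancestor in the dest-ancestor set,
--     # then truncate both chains there.
--     if src not in parents or dest not in parents: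
--         return None, None
--
--     def chain(node):
--         res = [(node, parents[node][1])]
--         while parents[node][2] > 0:
--             node = parents[node][0]
--             res.append((node, parents[node][1]))
--         return res
--
--     cs = chain(src)
--     cd = chain(dest)
--     dset = {n for n, _ in cd}
--     i = next(k for k, (n, _) in enumerate(cs) if n in dset)
--     lca = cs[i][0]
--     j = next(k for k, (n, _) in enumerate(cd) if n == lca)
--     power = max([0] + [w for _, w in cs[:i]] + [w for _, w in cd[:j]])
--     path = [n for n, _ in cs[:i + 1]] + [n for n, _ in cd[:j]][::-1]
--     return path, power
-- ===== Notes on version B (the rewrite author's own statement) =====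
-- stated objective: alternative
-- what changed: B builds each node's full root-ward ancestor chain once and finds the LCA as the first src-ancestor contained in the set of dest-ancestors, then truncates both chains there, instead of A's depth-equalisation loops followed by a lockstep climb of both nodes.
-- outside the precondition, e.g. on saumon({1: (2, 5, 3), 2: (2, 0, 0)}, 1, 2): A returns ([1, 2, 2, 2], 5), B returns ([1, 2], 5)
import Mathlib
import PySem

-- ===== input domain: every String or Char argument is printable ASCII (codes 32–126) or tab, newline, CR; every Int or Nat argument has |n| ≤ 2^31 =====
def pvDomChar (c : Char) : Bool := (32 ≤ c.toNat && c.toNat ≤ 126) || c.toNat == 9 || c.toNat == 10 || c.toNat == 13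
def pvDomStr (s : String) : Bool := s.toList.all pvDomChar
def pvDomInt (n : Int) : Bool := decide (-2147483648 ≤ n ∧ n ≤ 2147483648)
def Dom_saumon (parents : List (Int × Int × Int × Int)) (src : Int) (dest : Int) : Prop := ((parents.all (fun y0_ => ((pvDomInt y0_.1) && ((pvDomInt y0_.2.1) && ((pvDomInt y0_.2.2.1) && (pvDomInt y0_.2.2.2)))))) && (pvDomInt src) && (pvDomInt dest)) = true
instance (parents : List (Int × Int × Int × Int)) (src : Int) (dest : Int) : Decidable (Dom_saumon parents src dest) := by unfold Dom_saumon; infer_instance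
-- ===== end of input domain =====

-- B builds both full root-ward ancestor chains once and finds the LCA by a set
-- membership scan instead of A's depth-equalisation + lockstep climbing (objective:
-- alternative decomposition; same asymptotic cost).

-- ===== PORT A =====
-- dict lookup: parents[k] (first matching key; Pre_ demands nodup keys)
def pvLk (parents : List (Int × Int × Int × Int)) (k : Int) : Option (Int × Int × Int) :=
  (parents.find? (fun e => e.1 == k)).map (fun e => e.2)

-- A's two depth-equalisation while-loops (same body, used for src then dest);
-- the `none` lookup branch is Python's KeyError, excluded by Pre_.
def pvLoopEq (parents : List (Int × Int × Int × Int)) (pmin node : Int) (chemin : List Int)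
    (prof target : Int) : Int × Int × List Int × Int :=
  if prof > target then
    match pvLk parents node with
    | some (p, w, _) => pvLoopEq parents (max pmin w) p (chemin ++ [p]) (prof - 1) target
    | none => (pmin, node, chemin, prof)
  else (pmin, node, chemin, prof)
termination_by (prof - target).toNat
decreasing_by omega

-- A's third while-loop (climb both until the nodes coincide).  Python has no fuel;
-- under Pre_ the fuel parents.length + 1 is never exhausted, it only makes the
-- function total.  A `none` lookup is Python's KeyError, excluded by Pre_.
def pvLoop3 (parents : List (Int × Int × Int × Int)) :
    Nat → Int → Int → List Int → Int → List Int → Int × List Int × List Int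
  | 0, pmin, _, cs, _, cd => (pmin, cs, cd)
  | fuel + 1, pmin, ns, cs, nd, cd =>
    if ns ≠ nd then
      match pvLk parents ns, pvLk parents nd with
      | some (ps, ws, _), some (pd, wd, _) =>
          pvLoop3 parents fuel (max (max pmin ws) wd) ps (cs ++ [ps]) pd (cd ++ [pd])
      | _, _ => (pmin, cs, cd)
    else (pmin, cs, cd)

def saumon (parents : List (Int × Int × Int × Int)) (src : Int) (dest : Int) :
    Option (List Int) × Option Int :=
  match pvLk parents src, pvLk parents dest with
  | some es, some ed =>
    let r1 := pvLoopEq parents 0 src [src] es.2.2 ed.2.2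
    let r2 := pvLoopEq parents r1.1 dest [dest] ed.2.2 r1.2.2.2
    let r3 := pvLoop3 parents (parents.length + 1) r2.1 r1.2.1 r1.2.2.1 r2.2.1 r2.2.2.1
    (some (r3.2.1 ++ r3.2.2.dropLast.reverse), some r3.1)
  | _, _ => (none, none)

-- ===== PORT B =====
-- B's chain(node): (node, power) pairs walking parent links while depth > 0.
-- Fuel parents.length + 1 only makes it total (Pre_ keeps depths < parents.length);
-- a `none` lookup is Python's KeyError, excluded by Pre_.
def pvChain (parents : List (Int × Int × Int × Int)) : Nat → Int → List (Int × Int)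
  | 0, _ => []
  | fuel + 1, node =>
    match pvLk parents node with
    | none => []
    | some (p, w, d) => (node, w) :: (if d > 0 then pvChain parents fuel p else [])

def saumon_alt (parents : List (Int × Int × Int × Int)) (src : Int) (dest : Int) :
    Option (List Int) × Option Int :=
  if (pvLk parents src).isSome && (pvLk parents dest).isSome then
    let cs := pvChain parents (parents.length + 1) src
    let cd := pvChain parents (parents.length + 1) dest
    let dset : PySem.Set Int := PySem.Set.ofList (cd.map (fun e => e.1))
    let i := cs.findIdx (fun e => PySem.Set.contains dset e.1)
    let lca := ((cs.drop i).headD (0, 0)).1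
    let j := cd.findIdx (fun e => e.1 == lca)
    let power := (((cs.take i).map (fun e => e.2)) ++ ((cd.take j).map (fun e => e.2))).foldl max 0
    let path := ((cs.take (i + 1)).map (fun e => e.1)) ++ (((cd.take j).map (fun e => e.1)).reverse)
    (some path, some power)
  else (none, none)

-- ===== PRECONDITION & SPEC =====
-- Pre_: whenever both src and dest are keys (otherwise both programs answer
-- (None, None) and nothing more is needed), parents must be a consistent rooted
-- tree table — distinct keys, nonnegative stored depths, each positive-depth
-- node's parent present with depth one less, and a unique depth-0 (root) key.
-- Outside this A loops forever, raises KeyError, or (with depths inconsistent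
-- with the parent links) returns accidental paths with repeated nodes that only
-- reflect the bogus metadata.
def Pre_saumon (parents : List (Int × Int × Int × Int)) (src : Int) (dest : Int) : Prop :=
  ((∃ e ∈ parents, e.1 = src) ∧ (∃ e ∈ parents, e.1 = dest)) →
  ((parents.map (fun e => e.1)).Nodup ∧
   (∀ e ∈ parents, 0 ≤ e.2.2.2) ∧
   (∀ e ∈ parents, 0 < e.2.2.2 → ∃ f ∈ parents, f.1 = e.2.1 ∧ f.2.2.2 = e.2.2.2 - 1) ∧
   (∀ e ∈ parents, ∀ f ∈ parents, e.2.2.2 = 0 → f.2.2.2 = 0 → e.1 = f.1))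

instance (parents : List (Int × Int × Int × Int)) (src : Int) (dest : Int) :
    Decidable (Pre_saumon parents src dest) := by unfold Pre_saumon; infer_instance

def pvWitness_saumon : (List (Int × Int × Int × Int)) × Int × Int :=
  ([(1, 1, 0, 0), (2, 1, 5, 1), (3, 1, 4, 1), (4, 2, 7, 2)], 4, 3)

def Spec_saumon (parents : List (Int × Int × Int × Int)) (src : Int) (dest : Int) (out : Option (List Int) × Option Int) : Prop := out = saumon_alt parents src dest
instance (parents : List (Int × Int × Int × Int)) (src : Int) (dest : Int) (out : Option (List Int) × Option Int) : Decidable (Spec_saumon parents src dest out) := by unfold Spec_saumon; infer_instance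

-- ===== CLAIM (what is proved, stated in full; the proofs are below) =====
def Claim_equal_saumon : Prop := ∀ (parents : List (Int × Int × Int × Int)) (src : Int) (dest : Int), Dom_saumon parents src dest → Pre_saumon parents src dest → Spec_saumon parents src dest (saumon parents src dest)

-- ===== LEMMAS AND PROOFS =====

-- pvCh parents n c: n is a key and c is its full root-ward chain of (node, power) pairs.
inductive pvCh (parents : List (Int × Int × Int × Int)) : Int → List (Int × Int) → Prop
  | root (n p w : Int) : pvLk parents n = some (p, w, 0) → pvCh parents n [(n, w)]
  | step (n p w d : Int) (c : List (Int × Int)) : pvLk parents n = some (p, w, d) → 0 < d →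
      pvCh parents p c → pvCh parents n ((n, w) :: c)

theorem pv_lk_mem {parents : List (Int × Int × Int × Int)} {n p w d : Int}
    (h : pvLk parents n = some (p, w, d)) : (n, p, w, d) ∈ parents := by
  unfold pvLk at h
  cases hf : parents.find? (fun e => e.1 == n) with
  | none => simp [hf] at h
  | some e =>
    have hm := List.mem_of_find?_eq_some hf
    have hp := List.find?_some hf
    simp at hp
    simp [hf] at h
    obtain ⟨e1, e2, e3, e4⟩ := e
    simp_all

theorem pv_mem_lk {parents : List (Int × Int × Int × Int)} {n p w d : Int}
    (h1 : (parents.map (fun e => e.1)).Nodup)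
    (hm : (n, p, w, d) ∈ parents) : pvLk parents n = some (p, w, d) := by
  induction parents with
  | nil => simp at hm
  | cons e t ih =>
    simp at h1
    rcases List.mem_cons.mp hm with he | ht
    · subst he; simp [pvLk]
    · have hne : (e.1 == n) = false := by
        simp only [beq_eq_false_iff_ne, ne_eq]
        intro heq
        exact h1.1 p w d (heq ▸ ht)
      have := ih h1.2 ht
      unfold pvLk at this ⊢
      rw [List.find?_cons, hne]
      exact this

theorem pv_ch_lk {parents : List (Int × Int × Int × Int)} {n : Int} {c : List (Int × Int)}
    (h : pvCh parents n c) : ∃ p w d, pvLk parents n = some (p, w, d) ∧ ∃ t, c = (n, w) :: t := by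
  cases h with
  | root n p w hl => exact ⟨p, w, 0, hl, [], rfl⟩
  | step n p w d c hl hd hc => exact ⟨p, w, d, hl, c, rfl⟩

-- existence of the chain, by strong induction on the depth
theorem pv_lk_parent {parents : List (Int × Int × Int × Int)}
    (h1 : (parents.map (fun e => e.1)).Nodup)
    (h3 : ∀ e ∈ parents, 0 < e.2.2.2 → ∃ f ∈ parents, f.1 = e.2.1 ∧ f.2.2.2 = e.2.2.2 - 1)
    {n p w d : Int} (hl : pvLk parents n = some (p, w, d)) (hd : 0 < d) :
    ∃ p' w', pvLk parents p = some (p', w', d - 1) := by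
  obtain ⟨f, hf, hf1, hf2⟩ := h3 _ (pv_lk_mem hl) hd
  obtain ⟨f1, fp, fw, fd⟩ := f
  simp at hf1 hf2
  subst hf1 hf2
  exact ⟨fp, fw, pv_mem_lk h1 hf⟩

theorem pv_ch_exists {parents : List (Int × Int × Int × Int)}
    (h1 : (parents.map (fun e => e.1)).Nodup)
    (h2 : ∀ e ∈ parents, 0 ≤ e.2.2.2)
    (h3 : ∀ e ∈ parents, 0 < e.2.2.2 → ∃ f ∈ parents, f.1 = e.2.1 ∧ f.2.2.2 = e.2.2.2 - 1) :
    ∀ (m : Nat) (n p w d : Int), pvLk parents n = some (p, w, d) → d.toNat = m →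
      ∃ c, pvCh parents n c := by
  intro m
  induction m using Nat.strong_induction_on with
  | _ m ih =>
    intro n p w d hl hm
    by_cases hd : d = 0
    · exact ⟨_, pvCh.root n p w (hd ▸ hl)⟩
    · have hdp : 0 < d := lt_of_le_of_ne (h2 _ (pv_lk_mem hl)) (Ne.symm hd)
      obtain ⟨p', w', hlp⟩ := pv_lk_parent h1 h3 hl hdp
      obtain ⟨c, hc⟩ := ih (d - 1).toNat (by omega) p p' w' (d - 1) hlp rfl
      exact ⟨_, pvCh.step n p w d c hl hdp hc⟩

theorem pv_ch_length {parents : List (Int × Int × Int × Int)}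
    (h1 : (parents.map (fun e => e.1)).Nodup)
    (h2 : ∀ e ∈ parents, 0 ≤ e.2.2.2)
    (h3 : ∀ e ∈ parents, 0 < e.2.2.2 → ∃ f ∈ parents, f.1 = e.2.1 ∧ f.2.2.2 = e.2.2.2 - 1) :
    ∀ {n : Int} {c : List (Int × Int)} {p w d : Int}, pvCh parents n c →
      pvLk parents n = some (p, w, d) → c.length = d.toNat + 1 := by
  intro n c p w d h
  induction h generalizing p w d with
  | root n p' w' hl' =>
    intro hl; rw [hl'] at hl; simp_all
  | step n p' w' d' c' hl' hd' hc' ih =>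
    intro hl
    rw [hl'] at hl
    obtain ⟨e1, e2, e3⟩ := by simpa using hl
    subst e1 e2 e3
    obtain ⟨p2, w2, hlp⟩ := pv_lk_parent h1 h3 hl' hd'
    have := ih hlp
    simp [this]
    omega

theorem pv_chain_ch {parents : List (Int × Int × Int × Int)}
    (h1 : (parents.map (fun e => e.1)).Nodup)
    (h2 : ∀ e ∈ parents, 0 ≤ e.2.2.2)
    (h3 : ∀ e ∈ parents, 0 < e.2.2.2 → ∃ f ∈ parents, f.1 = e.2.1 ∧ f.2.2.2 = e.2.2.2 - 1) :
    ∀ (fuel : Nat) (n p w d : Int), pvLk parents n = some (p, w, d) → d.toNat < fuel →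
      pvCh parents n (pvChain parents fuel n) := by
  intro fuel
  induction fuel with
  | zero => intro n p w d _ hf; omega
  | succ f ih =>
    intro n p w d hl hf
    by_cases hd : 0 < d
    · obtain ⟨p', w', hlp⟩ := pv_lk_parent h1 h3 hl hd
      have : pvChain parents (f + 1) n = (n, w) :: pvChain parents f p := by
        simp [pvChain, hl, hd]
      rw [this]
      exact pvCh.step n p w d _ hl hd (ih p p' w' (d - 1) hlp (by omega))
    · have hd0 : d = 0 := le_antisymm (not_lt.mp hd) (h2 _ (pv_lk_mem hl))
      subst hd0
      have : pvChain parents (f + 1) n = [(n, w)] := by simp [pvChain, hl]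
      rw [this]
      exact pvCh.root n p w hl

theorem pv_ch_drop {parents : List (Int × Int × Int × Int)} {n : Int} {ch : List (Int × Int)}
    (h : pvCh parents n ch) :
    ∀ (k : Nat) (hk : k < ch.length), pvCh parents ((ch[k]'hk).1) (ch.drop k) := by
  induction h with
  | root n p w hl =>
    intro k hk
    simp at hk
    subst hk
    simpa using pvCh.root n p w hl
  | step n p w d c hl hd hc ih =>
    intro k hk
    match k with
    | 0 => simpa using pvCh.step n p w d c hl hd hc
    | Nat.succ k' => simpa using ih k' (by simpa using hk)

-- depth (and weight) at a chain position
theorem pv_ch_at {parents : List (Int × Int × Int × Int)}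
    (h1 : (parents.map (fun e => e.1)).Nodup)
    (h2 : ∀ e ∈ parents, 0 ≤ e.2.2.2)
    (h3 : ∀ e ∈ parents, 0 < e.2.2.2 → ∃ f ∈ parents, f.1 = e.2.1 ∧ f.2.2.2 = e.2.2.2 - 1)
    {n : Int} {ch : List (Int × Int)} {p w d : Int}
    (h : pvCh parents n ch) (hl : pvLk parents n = some (p, w, d)) :
    ∀ (k : Nat) (hk : k < ch.length),
      ∃ pk, pvLk parents ((ch[k]'hk).1) = some (pk, (ch[k]'hk).2, d - k) := by
  intro k hk
  have hdrop := pv_ch_drop h k hk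
  obtain ⟨pk, wk, dk, hlk, t, hteq⟩ := pv_ch_lk hdrop
  have hcons : ch.drop k = ch[k] :: ch.drop (k + 1) := List.drop_eq_getElem_cons hk
  rw [hcons] at hteq
  have hsnd : (ch[k]'hk).2 = wk := by
    have := (List.cons.injEq _ _ _ _).mp hteq
    rw [this.1]
  have hlen1 : (ch.drop k).length = dk.toNat + 1 := pv_ch_length h1 h2 h3 hdrop hlk
  have hlen2 : ch.length = d.toNat + 1 := pv_ch_length h1 h2 h3 h hl
  have hdk0 : 0 ≤ dk := h2 _ (pv_lk_mem hlk)
  have hd0 : 0 ≤ d := h2 _ (pv_lk_mem hl)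
  have : dk = d - k := by simp at hlen1; omega
  subst this
  rw [hsnd]
  exact ⟨pk, hlk⟩

theorem pv_depth_lt_len {parents : List (Int × Int × Int × Int)}
    (h1 : (parents.map (fun e => e.1)).Nodup)
    (h2 : ∀ e ∈ parents, 0 ≤ e.2.2.2)
    (h3 : ∀ e ∈ parents, 0 < e.2.2.2 → ∃ f ∈ parents, f.1 = e.2.1 ∧ f.2.2.2 = e.2.2.2 - 1)
    {n p w d : Int} (h : pvLk parents n = some (p, w, d)) : d.toNat < parents.length := by
  obtain ⟨c, hc⟩ := pv_ch_exists h1 h2 h3 d.toNat n p w d h rfl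
  have hlen : c.length = d.toNat + 1 := pv_ch_length h1 h2 h3 hc h
  have hnodup : (c.map (fun e => e.1)).Nodup := by
    rw [List.nodup_iff_injective_get]
    intro ⟨i, hi⟩ ⟨j, hj⟩ hij
    simp at hi hj hij
    obtain ⟨pi, hpi⟩ := pv_ch_at h1 h2 h3 hc h i hi
    obtain ⟨pj, hpj⟩ := pv_ch_at h1 h2 h3 hc h j hj
    rw [hij] at hpi
    rw [hpi] at hpj
    simp at hpj
    simp
    omega
  have hsub : (c.map (fun e => e.1)) ⊆ (parents.map (fun e => e.1)) := by
    intro x hx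
    obtain ⟨e, he, hex⟩ := List.mem_map.mp hx
    obtain ⟨q, hq, hqe⟩ := List.mem_iff_getElem.mp he
    obtain ⟨pq, hpq⟩ := pv_ch_at h1 h2 h3 hc h q hq
    rw [hqe] at hpq
    rw [← hex]
    exact List.mem_map.mpr ⟨_, pv_lk_mem hpq, rfl⟩
  have := (List.subperm_of_subset hnodup hsub).length_le
  simp at this hlen
  omega


-- index of A's meeting point in a pair of equal-depth chains
def pvMeet (ca cb : List (Int × Int)) : Nat :=
  (ca.zip cb).findIdx (fun q => q.1.1 == q.2.1)

theorem pv_headD_drop (l : List (Int × Int)) (i : Nat) (hi : i < l.length) :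
    (l.drop i).headD (0, 0) = l[i]'hi := by
  rw [List.headD_eq_head?_getD, List.head?_drop, List.getElem?_eq_getElem hi]
  rfl

theorem pv_findIdx_eq {α} (l : List α) (p : α → Bool) (i : Nat) (hi : i < l.length)
    (hlow : ∀ (j : Nat) (hj : j < l.length), j < i → p (l[j]'hj) = false)
    (hp : p (l[i]'hi) = true) : l.findIdx p = i := by
  have hlt : l.findIdx p < l.length :=
    List.findIdx_lt_length_of_exists ⟨l[i], List.getElem_mem hi, hp⟩
  rcases Nat.lt_trichotomy (l.findIdx p) i with h | h | h
  · have := List.findIdx_getElem (w := hlt)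
    rw [hlow _ hlt h] at this
    exact absurd this (by simp)
  · exact h
  · exact absurd hp (by simpa using List.not_of_lt_findIdx h)

-- A's depth-equalisation loop, characterised on a chain
theorem pv_loopEq_spec {parents : List (Int × Int × Int × Int)}
    (h1 : (parents.map (fun e => e.1)).Nodup)
    (h2 : ∀ e ∈ parents, 0 ≤ e.2.2.2)
    (h3 : ∀ e ∈ parents, 0 < e.2.2.2 → ∃ f ∈ parents, f.1 = e.2.1 ∧ f.2.2.2 = e.2.2.2 - 1) :
    ∀ (k : Nat) (a : Int) (ca : List (Int × Int)) (pmin : Int) (cs : List Int) (p w d t : Int),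
      pvCh parents a ca → pvLk parents a = some (p, w, d) → 0 ≤ t → t ≤ d → (d - t).toNat = k →
      pvLoopEq parents pmin a cs d t =
        (((ca.take k).map (fun e => e.2)).foldl max pmin,
         ((ca.drop k).headD (0, 0)).1,
         cs ++ ((ca.drop 1).take k).map (fun e => e.1),
         t) := by
  intro k
  induction k with
  | zero =>
    intro a ca pmin cs p w d t hc hl ht0 htd hk
    have hdt : d = t := by omega
    subst hdt
    obtain ⟨p', w', d', hl', tl, htl⟩ := pv_ch_lk hc
    rw [pvLoopEq]
    simp [htl]
  | succ k ih =>
    intro a ca pmin cs p w d t hc hl ht0 htd hk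
    have hdt : t < d := by omega
    have hd0 : 0 < d := by omega
    cases hc with
    | root a p0 w0 hl0 => rw [hl0] at hl; simp_all
    | step a p0 w0 d0 ca' hl0 hd0' hc' =>
      rw [hl0] at hl
      obtain ⟨e1, e2, e3⟩ : p0 = p ∧ w0 = w ∧ d0 = d := by simpa using hl
      subst e1
      subst e2
      subst e3
      obtain ⟨p', w', hlp⟩ := pv_lk_parent h1 h3 hl0 hd0'
      obtain ⟨q1, q2, q3, hlq, tl, htl⟩ := pv_ch_lk hc'
      rw [hlq] at hlp
      obtain ⟨f1, f2, f3⟩ : q1 = p' ∧ q2 = w' ∧ q3 = d0 - 1 := by simpa using hlp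
      subst f3
      have heval : pvLoopEq parents pmin a cs d0 t
          = pvLoopEq parents (max pmin w0) p0 (cs ++ [p0]) (d0 - 1) t := by
        rw [pvLoopEq]
        simp [hdt, hl0]
      rw [heval, ih p0 ca' (max pmin w0) (cs ++ [p0]) q1 q2 (d0 - 1) t hc' hlq ht0 (by omega) (by omega)]
      simp [htl, List.append_assoc]

-- A's third loop (lockstep climb until the nodes coincide), characterised on two equal-length chains
theorem pv_loop3_spec {parents : List (Int × Int × Int × Int)}
    (h1 : (parents.map (fun e => e.1)).Nodup)
    (h2 : ∀ e ∈ parents, 0 ≤ e.2.2.2)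
    (h3 : ∀ e ∈ parents, 0 < e.2.2.2 → ∃ f ∈ parents, f.1 = e.2.1 ∧ f.2.2.2 = e.2.2.2 - 1)
    (h4 : ∀ e ∈ parents, ∀ f ∈ parents, e.2.2.2 = 0 → f.2.2.2 = 0 → e.1 = f.1) :
    ∀ (len : Nat) (a b : Int) (ca cb : List (Int × Int)) (fuel : Nat) (pmin : Int) (cs cd : List Int),
      pvCh parents a ca → pvCh parents b cb → ca.length = len → cb.length = len → len ≤ fuel →
      pvLoop3 parents fuel pmin a cs b cd =
        (((ca.zip cb).take (pvMeet ca cb)).foldl (fun acc q => max (max acc q.1.2) q.2.2) pmin,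
         cs ++ ((ca.drop 1).take (pvMeet ca cb)).map (fun e => e.1),
         cd ++ ((cb.drop 1).take (pvMeet ca cb)).map (fun e => e.1)) := by
  intro len
  induction len with
  | zero =>
    intro a b ca cb fuel pmin cs cd hca hcb hla hlb hf
    obtain ⟨_, _, _, _, _, htl⟩ := pv_ch_lk hca
    subst htl; simp at hla
  | succ L ih =>
    intro a b ca cb fuel pmin cs cd hca hcb hla hlb hf
    obtain ⟨pa, wa, da, hlka, ta, hta⟩ := pv_ch_lk hca
    obtain ⟨pb, wb, db, hlkb, tb, htb⟩ := pv_ch_lk hcb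
    obtain ⟨f, hfuel⟩ : ∃ f, fuel = f + 1 := ⟨fuel - 1, by omega⟩
    subst hfuel
    by_cases hab : a = b
    · have hm : pvMeet ca cb = 0 := by
        unfold pvMeet
        rw [hta, htb]
        simp [List.findIdx_cons, hab]
      rw [hm]
      rw [pvLoop3]
      simp [hab]
    · -- both chains must be `step`s: a single root would force a = b
      cases hca with
      | root a2 p2 w2 hl2 =>
        cases hcb with
        | root b2 p3 w3 hl3 =>
          exact absurd (h4 _ (pv_lk_mem hl2) _ (pv_lk_mem hl3) rfl rfl) hab
        | step b2 p3 w3 d3 cb' hl3 hd3 hcb' =>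
          obtain ⟨_, _, _, _, _, htl'⟩ := pv_ch_lk hcb'
          subst htl'
          simp at hla hlb
          omega
      | step a2 p2 w2 d2 ca' hl2 hd2 hca' =>
        cases hcb with
        | root b2 p3 w3 hl3 =>
          obtain ⟨_, _, _, _, _, htl'⟩ := pv_ch_lk hca'
          subst htl'
          simp at hla hlb
          omega
        | step b2 p3 w3 d3 cb' hl3 hd3 hcb' =>
          have heval : pvLoop3 parents (f + 1) pmin a cs b cd
              = pvLoop3 parents f (max (max pmin w2) w3) p2 (cs ++ [p2]) p3 (cd ++ [p3]) := by
            rw [pvLoop3]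
            simp [hab, hl2, hl3]
          have hla' : ca'.length = L := by simp at hla; omega
          have hlb' : cb'.length = L := by simp at hlb; omega
          have hm : pvMeet ((a, w2) :: ca') ((b, w3) :: cb') = pvMeet ca' cb' + 1 := by
            unfold pvMeet
            have hfalse : (a == b) = false := by simpa using hab
            simp [List.findIdx_cons, hfalse]
          obtain ⟨qa1, qa2, qa3, hlqa, ta', hta'⟩ := pv_ch_lk hca'
          obtain ⟨qb1, qb2, qb3, hlqb, tb', htb'⟩ := pv_ch_lk hcb'
          rw [heval, ih p2 p3 ca' cb' f (max (max pmin w2) w3) (cs ++ [p2]) (cd ++ [p3])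
            hca' hcb' hla' hlb' (by omega)]
          rw [hm]
          simp [hta', htb', List.append_assoc]

-- the interleaved double-max fold of A's third loop, flattened
theorem pv_foldl_max2_flat :
    ∀ (z : List ((Int × Int) × (Int × Int))) (pm : Int),
      z.foldl (fun acc q => max (max acc q.1.2) q.2.2) pm
        = (z.flatMap (fun q => [q.1.2, q.2.2])).foldl max pm := by
  intro z
  induction z with
  | nil => intro pm; rfl
  | cons q t ih =>
    intro pm
    rw [List.flatMap_cons, List.foldl_cons, List.foldl_append, ih]
    rfl

theorem pv_zip_flat_perm :
    ∀ (xs ys : List (Int × Int)), xs.length = ys.length →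
      ((xs.zip ys).flatMap (fun q => [q.1.2, q.2.2])).Perm
        ((xs.map (fun e => e.2)) ++ (ys.map (fun e => e.2))) := by
  intro xs
  induction xs with
  | nil =>
    intro ys h
    cases ys with
    | nil => simp
    | cons y ys => simp at h
  | cons x xs ih =>
    intro ys h
    cases ys with
    | nil => simp at h
    | cons y ys =>
      simp only [List.zip_cons_cons, List.flatMap_cons, List.map_cons]
      refine List.Perm.trans ?_ (List.perm_middle.symm.cons _)
      exact ((ih ys (by simpa using h)).cons _).cons _

theorem pv_foldl_max_perm {l l' : List Int} (h : l.Perm l') (a : Int) :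
    l.foldl max a = l'.foldl max a := by
  exact h.foldl_eq a


theorem pv_take_zip :
    ∀ (xs ys : List (Int × Int)) (n : Nat),
      (xs.zip ys).take n = (xs.take n).zip (ys.take n) := by
  intro xs
  induction xs with
  | nil => intro ys n; simp
  | cons x xs ih =>
    intro ys n
    cases ys with
    | nil => simp
    | cons y ys =>
      cases n with
      | zero => simp
      | succ n => simp [ih ys n]

theorem pv_dropLast_take {α} (l : List α) (n : Nat) (h : n < l.length) :
    (l.take (n + 1)).dropLast = l.take n := by
  rw [List.dropLast_eq_take, List.take_take]
  congr 1
  simp [List.length_take]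
  omega

theorem pv_path_merge (l : List (Int × Int)) (x w0 : Int) (t0 : List (Int × Int))
    (hl : l = (x, w0) :: t0) (k m' : Nat) :
    ([x] ++ ((l.drop 1).take k).map (fun e => e.1)) ++ (((l.drop k).drop 1).take m').map (fun e => e.1)
      = (l.take (k + m' + 1)).map (fun e => e.1) := by
  subst hl
  have h1 : (((x, w0) :: t0).drop k).drop 1 = t0.drop k := by
    rw [List.drop_drop]
    simp [Nat.add_comm]
  rw [h1]
  have h2 : k + m' + 1 = (k + m') + 1 := rfl
  simp only [List.drop_succ_cons, List.drop_zero, List.take_succ_cons,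
    List.map_cons, List.take_add, List.map_append]
  simp

theorem pv_pow_merge (ca cb : List (Int × Int)) (k1 k2 m : Nat)
    (hma : k1 + m ≤ ca.length) (hmb : k2 + m ≤ cb.length) :
    (((ca.drop k1).zip (cb.drop k2)).take m).foldl (fun acc q => max (max acc q.1.2) q.2.2)
        (((cb.take k2).map (fun e => e.2)).foldl max (((ca.take k1).map (fun e => e.2)).foldl max 0))
      = (((ca.take (k1 + m)).map (fun e => e.2)) ++ ((cb.take (k2 + m)).map (fun e => e.2))).foldl max 0 := by
  rw [pv_foldl_max2_flat, pv_take_zip]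
  have hla : ((ca.drop k1).take m).length = m := by simp; omega
  have hlb : ((cb.drop k2).take m).length = m := by simp; omega
  have hperm1 := pv_zip_flat_perm ((ca.drop k1).take m) ((cb.drop k2).take m) (by rw [hla, hlb])
  -- abbreviations
  set S1 := (ca.take k1).map (fun e => e.2) with hS1
  set S2 := (cb.take k2).map (fun e => e.2) with hS2
  set A2 := ((ca.drop k1).take m).map (fun e => e.2) with hA2
  set B2 := ((cb.drop k2).take m).map (fun e => e.2) with hB2
  have hTa : (ca.take (k1 + m)).map (fun e => e.2) = S1 ++ A2 := by
    rw [List.take_add, List.map_append]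
  have hTb : (cb.take (k2 + m)).map (fun e => e.2) = S2 ++ B2 := by
    rw [List.take_add, List.map_append]
  rw [hTa, hTb]
  rw [← List.foldl_append, ← List.foldl_append]
  apply pv_foldl_max_perm
  rw [← List.append_assoc]
  have p1 : ((S1 ++ S2) ++ (((ca.drop k1).take m).zip ((cb.drop k2).take m)).flatMap (fun q => [q.1.2, q.2.2])).Perm
      ((S1 ++ S2) ++ (A2 ++ B2)) := List.Perm.append_left _ hperm1
  refine p1.trans ?_
  have e1 : (S1 ++ S2) ++ (A2 ++ B2) = S1 ++ ((S2 ++ A2) ++ B2) := by simp [List.append_assoc]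
  have e2 : S1 ++ ((A2 ++ S2) ++ B2) = (S1 ++ A2) ++ (S2 ++ B2) := by simp [List.append_assoc]
  rw [e1, ← e2]
  exact List.Perm.append_left _ (List.Perm.append_right _ List.perm_append_comm)

theorem pv_getElem_eq {α} (l : List α) (i j : Nat) (hi : i < l.length) (hj : j < l.length)
    (h : i = j) : l[i]'hi = l[j]'hj := by subst h; rfl

theorem pv_core {parents : List (Int × Int × Int × Int)}
    (h1 : (parents.map (fun e => e.1)).Nodup)
    (h2 : ∀ e ∈ parents, 0 ≤ e.2.2.2)
    (h3 : ∀ e ∈ parents, 0 < e.2.2.2 → ∃ f ∈ parents, f.1 = e.2.1 ∧ f.2.2.2 = e.2.2.2 - 1)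
    (h4 : ∀ e ∈ parents, ∀ f ∈ parents, e.2.2.2 = 0 → f.2.2.2 = 0 → e.1 = f.1)
    (src dest ps ws ds pd wd dd : Int)
    (hs : pvLk parents src = some (ps, ws, ds))
    (hdl : pvLk parents dest = some (pd, wd, dd))
    (k1 k2 : Nat)
    (hk1 : (k1 : Int) = ds - min ds dd)
    (hk2 : (k2 : Int) = dd - min ds dd) :
    (let ca := pvChain parents (parents.length + 1) src
     let cb := pvChain parents (parents.length + 1) dest
     let r3 := pvLoop3 parents (parents.length + 1)
       (((cb.take k2).map (fun e => e.2)).foldl max (((ca.take k1).map (fun e => e.2)).foldl max 0))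
       (((ca.drop k1).headD (0, 0)).1)
       ([src] ++ ((ca.drop 1).take k1).map (fun e => e.1))
       (((cb.drop k2).headD (0, 0)).1)
       ([dest] ++ ((cb.drop 1).take k2).map (fun e => e.1))
     ((some (r3.2.1 ++ r3.2.2.dropLast.reverse), some r3.1) : Option (List Int) × Option Int))
      = saumon_alt parents src dest := by
  have hds0 : 0 ≤ ds := h2 _ (pv_lk_mem hs)
  have hdd0 : 0 ≤ dd := h2 _ (pv_lk_mem hdl)
  have hdsl := pv_depth_lt_len h1 h2 h3 hs
  have hddl := pv_depth_lt_len h1 h2 h3 hdl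
  have hca := pv_chain_ch h1 h2 h3 (parents.length + 1) src ps ws ds hs (by omega)
  have hcb := pv_chain_ch h1 h2 h3 (parents.length + 1) dest pd wd dd hdl (by omega)
  set ca := pvChain parents (parents.length + 1) src with hcaE
  set cb := pvChain parents (parents.length + 1) dest with hcbE
  have hlena : ca.length = ds.toNat + 1 := pv_ch_length h1 h2 h3 hca hs
  have hlenb : cb.length = dd.toNat + 1 := pv_ch_length h1 h2 h3 hcb hdl
  have hk1lt : k1 < ca.length := by omega
  have hk2lt : k2 < cb.length := by omega
  have hheadA : (ca.drop k1).headD (0, 0) = ca[k1]'hk1lt := pv_headD_drop ca k1 hk1lt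
  have hheadB : (cb.drop k2).headD (0, 0) = cb[k2]'hk2lt := pv_headD_drop cb k2 hk2lt
  have hcha : pvCh parents ((ca[k1]'hk1lt).1) (ca.drop k1) := pv_ch_drop hca k1 hk1lt
  have hchb : pvCh parents ((cb[k2]'hk2lt).1) (cb.drop k2) := pv_ch_drop hcb k2 hk2lt
  obtain ⟨pka, hlkA⟩ := pv_ch_at h1 h2 h3 hca hs k1 hk1lt
  obtain ⟨pkb, hlkB⟩ := pv_ch_at h1 h2 h3 hcb hdl k2 hk2lt
  rw [show ds - (k1 : Int) = min ds dd by omega] at hlkA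
  rw [show dd - (k2 : Int) = min ds dd by omega] at hlkB
  have hlda : (ca.drop k1).length = (min ds dd).toNat + 1 := by
    rw [List.length_drop]; omega
  have hldb : (cb.drop k2).length = (min ds dd).toNat + 1 := by
    rw [List.length_drop]; omega
  -- closed form of the third loop
  have hl3 := pv_loop3_spec h1 h2 h3 h4 ((min ds dd).toNat + 1) ((ca[k1]'hk1lt).1) ((cb[k2]'hk2lt).1)
    (ca.drop k1) (cb.drop k2) (parents.length + 1)
    (((cb.take k2).map (fun e => e.2)).foldl max (((ca.take k1).map (fun e => e.2)).foldl max 0))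
    ([src] ++ ((ca.drop 1).take k1).map (fun e => e.1))
    ([dest] ++ ((cb.drop 1).take k2).map (fun e => e.1))
    hcha hchb hlda hldb (by omega)
  -- the meeting index
  set m := pvMeet (ca.drop k1) (cb.drop k2) with hmE
  have hzlen : ((ca.drop k1).zip (cb.drop k2)).length = (min ds dd).toNat + 1 := by
    rw [List.length_zip, hlda, hldb]; omega
  -- the two chains end at the same root, so a meeting point exists
  obtain ⟨pa0, hA0⟩ := pv_ch_at h1 h2 h3 hcha hlkA ((min ds dd).toNat) (by omega)
  obtain ⟨pb0, hB0⟩ := pv_ch_at h1 h2 h3 hchb hlkB ((min ds dd).toNat) (by omega)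
  rw [show min ds dd - (((min ds dd).toNat : Nat) : Int) = 0 by omega] at hA0 hB0
  have hroots : ((ca.drop k1)[(min ds dd).toNat]'(by omega)).1
      = ((cb.drop k2)[(min ds dd).toNat]'(by omega)).1 :=
    h4 _ (pv_lk_mem hA0) _ (pv_lk_mem hB0) rfl rfl
  have hmlt : m < (min ds dd).toNat + 1 := by
    have hin := List.findIdx_lt_length_of_exists (p := fun q => q.1.1 == q.2.1)
      ⟨((ca.drop k1).zip (cb.drop k2))[(min ds dd).toNat]'(by omega),
       List.getElem_mem _, by rw [List.getElem_zip]; simpa using hroots⟩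
    rw [hzlen] at hin
    exact hin
  have hmzlt : m < ((ca.drop k1).zip (cb.drop k2)).length := by omega
  have hmm : ((ca.drop k1)[m]'(by omega)).1 = ((cb.drop k2)[m]'(by omega)).1 := by
    have := List.findIdx_getElem (w := hmzlt)
    rw [List.getElem_zip] at this
    simpa using this
  have hbel : ∀ (j : Nat) (hj : j < m),
      ((ca.drop k1)[j]'(by omega)).1 ≠ ((cb.drop k2)[j]'(by omega)).1 := by
    intro j hj
    have hmF : m = List.findIdx (fun q => q.1.1 == q.2.1) ((ca.drop k1).zip (cb.drop k2)) := by
      rw [hmE]; rfl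
    have := List.not_of_lt_findIdx (p := fun q => q.1.1 == q.2.1)
      (xs := (ca.drop k1).zip (cb.drop k2)) (i := j) (by omega)
    rw [List.getElem_zip] at this
    simpa using this
  have hilt : k1 + m < ca.length := by omega
  have hjlt : k2 + m < cb.length := by omega
  -- meeting node on the full chains
  have hmmF : (ca[k1 + m]'hilt).1 = (cb[k2 + m]'hjlt).1 := by
    have h' := hmm
    rw [List.getElem_drop, List.getElem_drop] at h'
    exact h'
  -- B's first scan finds exactly the meeting position
  have hi : ca.findIdx (fun e => PySem.Set.contains (PySem.Set.ofList (cb.map (fun e => e.1))) e.1) = k1 + m := by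
    apply pv_findIdx_eq _ _ _ hilt
    · intro jj hjj hlt
      rw [Bool.eq_false_iff]
      intro htrue
      have hmem : (ca[jj]'hjj).1 ∈ cb.map (fun e => e.1) := by
        rw [PySem.Set.contains_eq_listContains] at htrue
        exact (PySem.Set.mem_ofList _ _).mp (List.mem_of_elem_eq_true htrue)
      obtain ⟨e, he, hee⟩ := List.mem_map.mp hmem
      obtain ⟨q, hq, hqe⟩ := List.mem_iff_getElem.mp he
      obtain ⟨pj, hPj⟩ := pv_ch_at h1 h2 h3 hca hs jj hjj
      obtain ⟨pq, hPq⟩ := pv_ch_at h1 h2 h3 hcb hdl q hq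
      have hnodes : (cb[q]'hq).1 = (ca[jj]'hjj).1 := by rw [hqe, hee]
      rw [hnodes, hPj] at hPq
      have hdq : ds - (jj : Int) = dd - (q : Int) := by
        have := Option.some.inj hPq
        simp at this
        omega
      rcases Nat.lt_or_ge jj k1 with hc | hc
      · omega
      · have hj' : jj - k1 < m := by omega
        apply hbel (jj - k1) hj'
        rw [List.getElem_drop, List.getElem_drop]
        rw [pv_getElem_eq ca (k1 + (jj - k1)) jj (by omega) hjj (by omega)]
        rw [pv_getElem_eq cb (k2 + (jj - k1)) q (by omega) hq (by omega)]
        rw [hqe, hee]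
    · rw [PySem.Set.contains_eq_listContains]
      apply List.elem_eq_true_of_mem
      refine (PySem.Set.mem_ofList _ _).mpr ?_
      rw [hmmF]
      exact List.mem_map.mpr ⟨_, List.getElem_mem hjlt, rfl⟩
  -- B's second scan finds the meeting node's position in dest's chain
  have hj : cb.findIdx (fun e => e.1 == (ca[k1 + m]'hilt).1) = k2 + m := by
    apply pv_findIdx_eq _ _ _ hjlt
    · intro q hq hltq
      rw [Bool.eq_false_iff]
      intro htrue
      have heq : (cb[q]'hq).1 = (ca[k1 + m]'hilt).1 := by simpa using htrue
      obtain ⟨pq, hPq⟩ := pv_ch_at h1 h2 h3 hcb hdl q hq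
      obtain ⟨pi2, hPi⟩ := pv_ch_at h1 h2 h3 hca hs (k1 + m) hilt
      rw [heq, hPi] at hPq
      have hdq : ds - ((k1 + m : Nat) : Int) = dd - (q : Int) := by
        have := Option.some.inj hPq
        simp at this
        omega
      omega
    · simpa using hmmF.symm
  -- reduce side A to the closed form
  simp only [hheadA, hheadB, hl3]
  -- reduce side B
  simp only [saumon_alt, hs, hdl, Option.isSome_some, Bool.and_self, if_true]
  rw [← hcaE, ← hcbE]
  rw [hi, pv_headD_drop ca (k1 + m) hilt, hj]
  simp only [Prod.mk.injEq, Option.some.injEq]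
  obtain ⟨pw0, w0, d0, hl0, t0, ht0⟩ := pv_ch_lk hca
  obtain ⟨pw1, w1, d1, hl1, t1, ht1⟩ := pv_ch_lk hcb
  constructor
  · -- the path
    rw [pv_path_merge ca src w0 t0 ht0 k1 m, pv_path_merge cb dest w1 t1 ht1 k2 m]
    rw [← List.map_dropLast, pv_dropLast_take cb (k2 + m) (by omega)]
  · -- the power
    exact pv_pow_merge ca cb k1 k2 m (by omega) (by omega)


-- ===== VERDICT (by name: the statement is the Claim_ definition above) =====
theorem saumon_spec : Claim_equal_saumon := by
  intro parents src dest hdom hpre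
  unfold Spec_saumon
  cases hs : pvLk parents src with
  | none => simp [saumon, saumon_alt, hs]
  | some es =>
    cases hdl : pvLk parents dest with
    | none => simp [saumon, saumon_alt, hs, hdl]
    | some ed =>
      obtain ⟨ps, ws, ds⟩ := es
      obtain ⟨pd, wd, dd⟩ := ed
      obtain ⟨h1, h2, h3, h4⟩ := hpre
        ⟨⟨_, pv_lk_mem hs, rfl⟩, ⟨_, pv_lk_mem hdl, rfl⟩⟩
      have hds0 : 0 ≤ ds := h2 _ (pv_lk_mem hs)
      have hdd0 : 0 ≤ dd := h2 _ (pv_lk_mem hdl)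
      have hdsl := pv_depth_lt_len h1 h2 h3 hs
      have hddl := pv_depth_lt_len h1 h2 h3 hdl
      have hca := pv_chain_ch h1 h2 h3 (parents.length + 1) src ps ws ds hs (by omega)
      have hcb := pv_chain_ch h1 h2 h3 (parents.length + 1) dest pd wd dd hdl (by omega)
      have hA : saumon parents src dest
          = (let r1 := pvLoopEq parents 0 src [src] ds dd
             let r2 := pvLoopEq parents r1.1 dest [dest] dd r1.2.2.2
             let r3 := pvLoop3 parents (parents.length + 1) r2.1 r1.2.1 r1.2.2.1 r2.2.1 r2.2.2.1
             (some (r3.2.1 ++ r3.2.2.dropLast.reverse), some r3.1)) := by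
        unfold saumon
        rw [hs, hdl]
      rw [hA]
      by_cases hcase : dd ≤ ds
      · have hr1 := pv_loopEq_spec h1 h2 h3 (ds - dd).toNat src
          (pvChain parents (parents.length + 1) src) 0 [src] ps ws ds dd hca hs hdd0 hcase rfl
        rw [hr1]
        have hr2 := pv_loopEq_spec h1 h2 h3 0 dest
          (pvChain parents (parents.length + 1) dest)
          ((((pvChain parents (parents.length + 1) src).take ((ds - dd).toNat)).map (fun e => e.2)).foldl max 0)
          [dest] pd wd dd dd hcb hdl hdd0 le_rfl (by omega)
        simp only []
        rw [hr2]
        have hcore := pv_core h1 h2 h3 h4 src dest ps ws ds pd wd dd hs hdl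
          ((ds - dd).toNat) 0 (by omega) (by omega)
        simp only [] at hcore
        simpa using hcore
      · have hr1 : pvLoopEq parents 0 src [src] ds dd = (0, src, [src], ds) := by
          rw [pvLoopEq]
          rw [if_neg (by omega)]
        rw [hr1]
        simp only []
        have hr2 := pv_loopEq_spec h1 h2 h3 (dd - ds).toNat dest
          (pvChain parents (parents.length + 1) dest) 0 [dest] pd wd dd ds hcb hdl hds0 (by omega) rfl
        rw [hr2]
        have hcore := pv_core h1 h2 h3 h4 src dest ps ws ds pd wd dd hs hdl
          0 ((dd - ds).toNat) (by omega) (by omega)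
        simp only [] at hcore
        obtain ⟨p0, w0, d0, hl0, t0, ht0⟩ := pv_ch_lk hca
        have hhead : ((pvChain parents (parents.length + 1) src).headD (0, 0)).1 = src := by
          rw [ht0]
          rfl
        simp only [List.take_zero, List.drop_zero, List.map_nil, List.foldl_nil,
          List.append_nil] at hcore
        rw [hhead] at hcore
        simpa using hcore
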